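-- pv_equiv track=rewrite | github.com/omendram/text-mining | Main.py | splitEnds
-- ===== SOURCE A (Python) =====
-- def splitEnds(inputStr):
--     sentence = inputStr.split()
--     sentenceSplits = []
--     answer = ''
--
--     for idx, word in enumerate(sentence):
--         answer = answer + ' ' + word
--
--         if idx > 1:
--             if word == 'and' or word[-1] == ',' or word == ',' or idx == len(sentence)-1:
--                 if len(answer.replace('and', '').strip()) > 2:
--                     sentenceSplits.append(answer)
--                 answer = ''
--
--     return sentenceSplits;
-- ===== SOURCE B (Python) =====
-- def splitEnds(inputStr):
--     words = inputStr.split()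
--     n = len(words)
--     bounds = [i for i in range(2, n)
--               if words[i] == 'and' or words[i][-1] == ',' or i == n - 1]
--     out = []
--     prev = -1
--     for b in bounds:
--         seg = ' ' + ' '.join(words[prev + 1:b + 1])
--         if len(seg.replace('and', '').strip()) > 2:
--             out.append(seg)
--         prev = b
--     return out
-- ===== Notes on version B (the rewrite author's own statement) =====
-- stated objective: alternative
-- what changed: B first collects the list of boundary indices in one comprehension, then slices the word list at those boundaries and joins each segment, instead of A's single fold that accumulates a growing answer string word by word and resets it at boundaries.
import Mathlib
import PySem

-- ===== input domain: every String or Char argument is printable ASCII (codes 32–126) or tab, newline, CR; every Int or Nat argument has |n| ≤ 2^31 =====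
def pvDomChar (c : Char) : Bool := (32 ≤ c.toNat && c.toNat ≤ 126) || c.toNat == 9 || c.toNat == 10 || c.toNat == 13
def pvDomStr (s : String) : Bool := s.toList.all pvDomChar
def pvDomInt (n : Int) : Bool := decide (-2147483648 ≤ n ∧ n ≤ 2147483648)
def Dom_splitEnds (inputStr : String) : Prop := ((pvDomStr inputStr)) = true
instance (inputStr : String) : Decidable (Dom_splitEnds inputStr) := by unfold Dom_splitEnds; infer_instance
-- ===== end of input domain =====

-- B collects the boundary indices first and then slices the word list into segments; A accumulates a
-- growing answer string word by word, resetting it at each boundary (alternative decomposition, same cost).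

-- ===== PORT A =====
-- A's loop body: answer grows by ' ' + word; at a boundary (idx > 1) the answer is flushed if its
-- 'and'-stripped, whitespace-stripped form is longer than 2 chars.  The str answer is carried as List Char.
def ansStepA (ws : List String) (st : List String × List Char) (p : Int × String) : List String × List Char :=
  let answer := st.2 ++ ' ' :: p.2.toList
  if p.1 > 1 then
    if p.2 == "and" || PySem.List.pyGet? p.2.toList (-1) == some ',' || p.2 == "," || p.1 == (ws.length : Int) - 1 then
      if 2 < (PySem.Chars.strip (PySem.Chars.replace answer ['a', 'n', 'd'] [])).length then
        (st.1 ++ [String.ofList answer], [])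
      else (st.1, [])
    else (st.1, answer)
  else (st.1, answer)

def splitEnds (inputStr : String) : List String :=
  let sentence := PySem.Str.split₀ inputStr
  ((PySem.List.enumerate sentence 0).foldl (ansStepA sentence) ([], [])).1

-- ===== PORT B =====
def boundB (ws : List String) (i : Int) : Bool :=
  let w := PySem.List.pyGetD ws i ""
  w == "and" || PySem.List.pyGet? w.toList (-1) == some ',' || i == (ws.length : Int) - 1

def segStepB (ws : List String) (st : List String × Int) (b : Int) : List String × Int :=
  let seg := ' ' :: PySem.Chars.join [' '] ((PySem.List.slice ws (some (st.2 + 1)) (some (b + 1))).map String.toList)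
  if 2 < (PySem.Chars.strip (PySem.Chars.replace seg ['a', 'n', 'd'] [])).length then
    (st.1 ++ [String.ofList seg], b)
  else (st.1, b)

def splitEnds_alt (inputStr : String) : List String :=
  let words := PySem.Str.split₀ inputStr
  (((PySem.List.pyRange 2 (words.length : Int) 1).filter (boundB words)).foldl (segStepB words) ([], -1)).1

-- ===== PRECONDITION & SPEC =====
def Spec_splitEnds (inputStr : String) (out : List String) : Prop := out = splitEnds_alt inputStr
instance (inputStr : String) (out : List String) : Decidable (Spec_splitEnds inputStr out) := by unfold Spec_splitEnds; infer_instance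

-- ===== CLAIM (what is proved, stated in full; the proofs are below) =====
def Claim_equal_splitEnds : Prop := ∀ (inputStr : String), Dom_splitEnds inputStr → Spec_splitEnds inputStr (splitEnds inputStr)

-- ===== LEMMAS AND PROOFS =====

-- A's accumulated answer over a segment of words: the concatenation of ' ' + w.
def ansOf (l : List String) : List Char := l.flatMap (fun w => ' ' :: w.toList)

theorem ansOf_append_singleton (l : List String) (w : String) :
    ansOf l ++ ' ' :: w.toList = ansOf (l ++ [w]) := by
  simp [ansOf]

-- B's segment string (' ' + ' '.join(seg)) equals A's accumulated answer on a nonempty segment.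
theorem seg_eq_ansOf (x : String) (xs : List String) :
    ' ' :: PySem.Chars.join [' '] ((x :: xs).map String.toList) = ansOf (x :: xs) := by
  induction xs generalizing x with
  | nil => simp [ansOf, PySem.Chars.join_singleton]
  | cons y ys ih =>
    rw [List.map_cons, List.map_cons, PySem.Chars.join_cons_cons]
    have h := ih y
    simp only [ansOf, List.flatMap_cons, List.map_cons] at h ⊢
    simp only [List.append_assoc, List.cons_append, List.nil_append] at h ⊢
    simp only [List.cons.injEq, true_and] at h
    rw [h]

theorem seg_eq_ansOf' (l : List String) (w : String) :
    ' ' :: PySem.Chars.join [' '] ((l ++ [w]).map String.toList) = ansOf (l ++ [w]) := by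
  cases l with
  | nil => exact seg_eq_ansOf w []
  | cons a as => rw [List.cons_append]; exact seg_eq_ansOf a (as ++ [w])

-- A's boundary test on the word at index pre.length + mid.length equals B's test there
-- (A's extra disjunct word == "," is subsumed by word[-1] == ',').
theorem cond_eq (pre mid suf' : List String) (w : String) :
    (w == "and" || PySem.List.pyGet? w.toList (-1) == some ',' || w == "," ||
      (((pre.length : Int) + (mid.length : Int)) == ((pre ++ mid ++ w :: suf').length : Int) - 1))
      = boundB (pre ++ mid ++ w :: suf') ((pre.length : Int) + (mid.length : Int)) := by
  unfold boundB
  have hg : PySem.List.pyGetD (pre ++ mid ++ w :: suf') ((pre.length : Int) + (mid.length : Int)) "" = w := by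
    have h1 : ((pre.length : Int) + (mid.length : Int)) = (((pre ++ mid).length : Nat) : Int) := by
      simp
    rw [h1, PySem.List.pyGetD_natCast]
    rw [List.append_assoc]
    simp [List.getD_eq_getElem?_getD]
  rw [hg]
  by_cases hc : w = ","
  · have hcomma : PySem.List.pyGet? [','] (-1) = some ',' := by decide
    simp [hc, hcomma]
  · have hne : (w == ",") = false := by simp [hc]
    simp [hne]

-- Main invariant: processing the tail suf of the sentence from position pre.length + mid.length,
-- with A's answer = ansOf mid and B's prev = pre.length - 1, yields the same final output list.
theorem inv (ws : List String) : ∀ (suf pre mid acc : List String),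
    ws = pre ++ mid ++ suf → 2 ≤ pre.length + mid.length →
    ((PySem.List.enumerate suf ((pre.length : Int) + (mid.length : Int))).foldl (ansStepA ws) (acc, ansOf mid)).1
      = (((PySem.List.pyRange ((pre.length : Int) + (mid.length : Int)) (ws.length : Int) 1).filter (boundB ws)).foldl (segStepB ws) (acc, (pre.length : Int) - 1)).1 := by
  intro suf
  induction suf with
  | nil =>
    intro pre mid acc hws h2
    subst hws
    rw [PySem.List.pyRange_one_eq_nil (by simp)]
    simp [PySem.List.enumerate]
  | cons w suf' ih =>
    intro pre mid acc hws h2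
    have hkn : ((pre.length : Int) + (mid.length : Int)) < (ws.length : Int) := by
      subst hws
      simp only [List.length_append, List.length_cons]
      push_cast
      omega
    rw [PySem.List.enumerate_cons, PySem.List.pyRange_one_cons hkn]
    simp only [List.foldl_cons]
    -- reduce A's step
    have hgt : ((pre.length : Int) + (mid.length : Int)) > 1 := by
      have : (2 : Int) ≤ (pre.length : Int) + (mid.length : Int) := by exact_mod_cast h2
      omega
    have hcond := cond_eq pre mid suf' w
    rw [← hws] at hcond
    by_cases hb : boundB ws ((pre.length : Int) + (mid.length : Int)) = true
    · -- boundary index: both sides flush the current segment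
      rw [List.filter_cons_of_pos hb]
      simp only [List.foldl_cons]
      -- B's step: its slice is exactly mid ++ [w]
      have hslice : PySem.List.slice ws (some ((pre.length : Int) - 1 + 1))
          (some (((pre.length : Int) + (mid.length : Int)) + 1)) = mid ++ [w] := by
        have e1 : ((pre.length : Int) - 1 + 1) = ((pre.length : Nat) : Int) := by omega
        have e2 : (((pre.length : Int) + (mid.length : Int)) + 1) = ((pre.length + (mid.length + 1) : Nat) : Int) := by
          push_cast; ring
        rw [e1, e2, PySem.List.slice_natCast, hws, List.append_assoc, List.drop_left]
        have e3 : pre.length + (mid.length + 1) - pre.length = mid.length + 1 := by omega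
        have e4 : mid.length + 1 - mid.length = 1 := by omega
        rw [e3, List.take_append, e4, List.take_succ_cons, List.take_zero,
          List.take_of_length_le (by omega)]
      have hA : ansStepA ws (acc, ansOf mid) (((pre.length : Int) + (mid.length : Int)), w)
          = (if 2 < (PySem.Chars.strip (PySem.Chars.replace (ansOf (mid ++ [w])) ['a', 'n', 'd'] [])).length then
              (acc ++ [String.ofList (ansOf (mid ++ [w]))], ([] : List Char))
            else (acc, ([] : List Char))) := by
        unfold ansStepA
        simp only [if_pos hgt, hcond, hb, if_pos, ansOf_append_singleton]
      have hB : segStepB ws (acc, (pre.length : Int) - 1) ((pre.length : Int) + (mid.length : Int))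
          = (if 2 < (PySem.Chars.strip (PySem.Chars.replace (ansOf (mid ++ [w])) ['a', 'n', 'd'] [])).length then
              (acc ++ [String.ofList (ansOf (mid ++ [w]))], (pre.length : Int) + (mid.length : Int))
            else (acc, (pre.length : Int) + (mid.length : Int))) := by
        unfold segStepB
        rw [hslice, seg_eq_ansOf']
      rw [hA, hB]
      have hrec := fun acc' => ih (pre ++ mid ++ [w]) [] acc'
        (by rw [hws]; simp)
        (by simp only [List.length_append, List.length_cons, List.length_nil]; omega)
      have hcast1 : ((((pre ++ mid ++ [w]).length : Nat)) : Int) = ((pre.length : Int) + (mid.length : Int)) + 1 := by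
        simp only [List.length_append, List.length_cons, List.length_nil]
        push_cast
        ring
      by_cases ht : 2 < (PySem.Chars.strip (PySem.Chars.replace (ansOf (mid ++ [w])) ['a', 'n', 'd'] [])).length
      · rw [if_pos ht, if_pos ht]
        have h := hrec (acc ++ [String.ofList (ansOf (mid ++ [w]))])
        rw [hcast1] at h
        simpa [ansOf] using h
      · rw [if_neg ht, if_neg ht]
        have h := hrec acc
        rw [hcast1] at h
        simpa [ansOf] using h
    · -- not a boundary: A extends answer, B's filter drops the index
      rw [List.filter_cons_of_neg (by simp [hb])]
      have hA : ansStepA ws (acc, ansOf mid) (((pre.length : Int) + (mid.length : Int)), w)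
          = (acc, ansOf (mid ++ [w])) := by
        unfold ansStepA
        simp only [if_pos hgt, hcond, hb, ansOf_append_singleton]
        simp
      rw [hA]
      have h := ih pre (mid ++ [w]) acc (by rw [hws]; simp)
        (by simp only [List.length_append, List.length_cons, List.length_nil]; omega)
      have hcast : ((pre.length : Int) + (((mid ++ [w]).length : Nat) : Int)) = ((pre.length : Int) + (mid.length : Int)) + 1 := by
        simp only [List.length_append, List.length_cons, List.length_nil]
        push_cast
        ring
      rw [hcast] at h
      exact h

-- ===== VERDICT (by name: the statement is the Claim_ definition above) =====
theorem splitEnds_spec : Claim_equal_splitEnds := by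
  intro inputStr _
  unfold Spec_splitEnds
  simp only [splitEnds, splitEnds_alt]
  cases hws : PySem.Str.split₀ inputStr with
  | nil => simp [PySem.List.enumerate, PySem.List.pyRange_one_eq_nil (by norm_num : (0:Int) ≤ 2)]
  | cons w0 tl =>
    cases tl with
    | nil =>
      simp [PySem.List.enumerate, ansStepA, PySem.List.pyRange_one_eq_nil (by norm_num : (1:Int) ≤ 2)]
    | cons w1 rest =>
      rw [PySem.List.enumerate_cons]
      rw [PySem.List.enumerate_cons]
      simp only [List.foldl_cons]
      have h0 : ansStepA (w0 :: w1 :: rest) (([] : List String), ([] : List Char)) (0, w0)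
          = ([], ' ' :: w0.toList) := by
        unfold ansStepA; norm_num
      have h1 : ansStepA (w0 :: w1 :: rest) (([] : List String), ' ' :: w0.toList) (0 + 1, w1)
          = ([], ansOf [w0, w1]) := by
        unfold ansStepA; norm_num [ansOf]
      rw [h0, h1]
      have h := inv (w0 :: w1 :: rest) rest [] [w0, w1] [] rfl (by simp)
      simp only [List.length_nil, List.length_cons] at h
      norm_num at h ⊢
      exact h
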